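-- pv_equiv track=rewrite | github.com/PavelitelDemonov/hackathon_educations | apps/users/models.py | experience_required_for_level
-- ===== SOURCE A (Python) =====
-- def experience_required_for_level(level):
--     target_level = max(1, int(level))
--     if target_level <= 1:
--         return 0
--     # Пороги: до 2 уровня — 100 XP, дальше +50 XP к следующему уровню.
--     # Пример: L2=100, L3=250, L4=450, L5=700 ...
--     total = 0
--     for next_level in range(2, target_level + 1):
--         total += 100 + (next_level - 2) * 50
--     return total
-- ===== SOURCE B (Python) =====
-- def experience_required_for_level(level):
--     # Closed form of the arithmetic series: n = levels gained past 1,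
--     # sum = 100*n + 50*(0+1+...+(n-1)) = 25*n*(n+3).
--     n = max(1, int(level)) - 1
--     return 25 * n * (n + 3)
-- ===== Notes on version B (the rewrite author's own statement) =====
-- stated objective: faster
-- what changed: Replaced the O(n) loop summing per-level XP increments with the closed-form arithmetic-series formula 25*n*(n+3) where n = max(1, level) - 1.
import Mathlib
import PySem

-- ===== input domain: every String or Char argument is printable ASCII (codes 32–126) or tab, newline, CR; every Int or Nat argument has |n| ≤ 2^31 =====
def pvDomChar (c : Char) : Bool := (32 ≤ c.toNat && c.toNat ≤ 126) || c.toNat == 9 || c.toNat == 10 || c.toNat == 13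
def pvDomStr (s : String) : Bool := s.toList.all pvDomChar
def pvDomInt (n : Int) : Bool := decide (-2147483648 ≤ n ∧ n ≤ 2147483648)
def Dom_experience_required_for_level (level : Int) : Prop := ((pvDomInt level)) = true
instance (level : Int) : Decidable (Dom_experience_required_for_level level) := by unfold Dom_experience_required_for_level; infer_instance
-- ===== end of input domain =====

-- ===== PORT A =====
-- B: closed-form arithmetic-series formula instead of A's summation loop (faster).
def experience_required_for_level (level : Int) : Int :=
  let target_level := max 1 level
  if target_level ≤ 1 then 0
  else
    (PySem.List.pyRange 2 (target_level + 1) 1).foldl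
      (fun total next_level => total + (100 + (next_level - 2) * 50)) 0

-- ===== PORT B =====
def experience_required_for_level_alt (level : Int) : Int :=
  let n := max 1 level - 1
  25 * n * (n + 3)

-- ===== PRECONDITION & SPEC =====
def Spec_experience_required_for_level (level : Int) (out : Int) : Prop := out = experience_required_for_level_alt level
instance (level : Int) (out : Int) : Decidable (Spec_experience_required_for_level level out) := by unfold Spec_experience_required_for_level; infer_instance

-- ===== CLAIM (what is proved, stated in full; the proofs are below) =====
def Claim_equal_experience_required_for_level : Prop := ∀ (level : Int), Dom_experience_required_for_level level → Spec_experience_required_for_level level (experience_required_for_level level)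

-- ===== LEMMAS AND PROOFS =====

-- ===== VERDICT (by name: the statement is the Claim_ definition above) =====
lemma pv_sumA (m : Nat) :
    (PySem.List.pyRange 2 ((m : Int) + 2) 1).foldl
      (fun total next_level => total + (100 + (next_level - 2) * 50)) 0
      = 25 * (m : Int) * ((m : Int) + 3) := by
  induction m with
  | zero =>
      rw [PySem.List.pyRange_one_eq_nil (by norm_num)]
      simp
  | succ k ih =>
      have h : ((k + 1 : Nat) : Int) + 2 = ((k : Int) + 2) + 1 := by push_cast; ring
      rw [h, PySem.List.pyRange_one_succ_right (by omega : (2:Int) ≤ (k : Int) + 2), List.foldl_append, ih]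
      simp [List.foldl]
      push_cast
      ring

theorem experience_required_for_level_spec : Claim_equal_experience_required_for_level := by
  intro level _
  unfold Spec_experience_required_for_level experience_required_for_level experience_required_for_level_alt
  by_cases h : level ≤ 1
  · simp only [max_le_iff]
    rw [if_pos ⟨le_refl 1, h⟩]
    have : max 1 level = 1 := by omega
    rw [this]
    norm_num
  · have hmax : max 1 level = level := by omega
    simp only [hmax]
    rw [if_neg (by omega)]
    have hm : level + 1 = ((level - 2).toNat : Int) + 2 + 1 ∧ level - 1 = ((level - 2).toNat : Int) + 1 := by
      constructor <;> omega
    rw [show level + 1 = (((level - 2).toNat + 1 : Nat) : Int) + 2 by push_cast; omega]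
    rw [pv_sumA]
    push_cast
    have : (level : Int) - 2 = ((level - 2).toNat : Int) := by omega
    nlinarith [this]
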